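-- pv_equiv track=rewrite | github.com/ekram-kedir/interview-prep | 0718-maximum-length-of-repeated-subarray/0718-maximum-length-of-repeated-subarray.py | check
-- ===== SOURCE A (Python) =====
-- def check(nums1, nums2, i, j):
--
--     max_length = 0
--     current_length = 0
--
--     while i < len(nums1) and j < len(nums2):
--         if nums1[i] == nums2[j]:
--             current_length += 1
--             max_length = max(max_length, current_length)
--         else:
--             current_length = 0
--         i += 1
--         j += 1
--
--     return max_length
-- ===== SOURCE B (Python) =====
-- def check(nums1, nums2, i, j):
--     xs = nums1[i:]
--     ys = nums2[j:]
--     n = min(len(xs), len(ys))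
--     breaks = [-1] + [k for k in range(n) if xs[k] != ys[k]] + [n]
--     return max(b - a - 1 for a, b in zip(breaks, breaks[1:]))
-- ===== Notes on version B (the rewrite author's own statement) =====
-- stated objective: alternative
-- what changed: Instead of walking the diagonal with a running current/max accumulator, B slices the two aligned tails, collects the mismatch positions with two sentinels, and returns the largest gap between consecutive break positions; Pre_ excludes negative i or j, where A's negative-index wraparound (or IndexError below -len) is an accident of indexing while B slices the tail.
-- outside the precondition, e.g. on check([1, 2, 3], [1, 2, 3], -1, -1): A returns 4, B returns 1
import Mathlib
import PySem

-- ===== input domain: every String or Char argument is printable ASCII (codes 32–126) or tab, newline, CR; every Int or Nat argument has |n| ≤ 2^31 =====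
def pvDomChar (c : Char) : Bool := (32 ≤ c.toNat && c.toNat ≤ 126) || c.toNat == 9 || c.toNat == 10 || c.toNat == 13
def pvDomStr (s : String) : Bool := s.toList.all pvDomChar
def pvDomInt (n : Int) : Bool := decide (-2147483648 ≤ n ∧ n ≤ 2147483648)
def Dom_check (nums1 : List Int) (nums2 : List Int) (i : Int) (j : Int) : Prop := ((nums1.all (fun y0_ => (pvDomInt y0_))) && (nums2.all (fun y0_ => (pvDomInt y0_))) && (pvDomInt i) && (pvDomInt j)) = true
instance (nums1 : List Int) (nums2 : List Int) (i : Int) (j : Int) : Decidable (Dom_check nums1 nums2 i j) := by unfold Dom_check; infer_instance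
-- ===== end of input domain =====

-- B replaces A's running current/max accumulator loop with a break-position (mismatch index) list
-- plus a max over gaps between consecutive breaks; equivalence is proved for non-negative i, j.

-- ===== PORT A =====
-- the while loop of A, state (i, j, max_length, current_length)
def checkLoop (nums1 : List Int) (nums2 : List Int) (i j maxL curL : Int) : Int :=
  if h : i < PySem.List.len nums1 ∧ j < PySem.List.len nums2 then
    match PySem.List.pyGet? nums1 i, PySem.List.pyGet? nums2 j with
    | some a, some b =>
        if a == b then
          checkLoop nums1 nums2 (i + 1) (j + 1) (max maxL (curL + 1)) (curL + 1)
        else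
          checkLoop nums1 nums2 (i + 1) (j + 1) maxL 0
    | _, _ => maxL   -- IndexError in Python (i or j below -len); Pre_check excludes this
  else maxL
termination_by (PySem.List.len nums1 - i).toNat
decreasing_by all_goals (simp only [PySem.List.len_eq] at *; omega)

def check (nums1 : List Int) (nums2 : List Int) (i : Int) (j : Int) : Int :=
  checkLoop nums1 nums2 i j 0 0

-- ===== PORT B =====
def check_alt (nums1 : List Int) (nums2 : List Int) (i : Int) (j : Int) : Int :=
  let xs := PySem.List.slice nums1 (some i) none
  let ys := PySem.List.slice nums2 (some j) none
  let n : Int := min (PySem.List.len xs) (PySem.List.len ys)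
  let breaks : List Int :=
    [-1] ++ (PySem.List.pyRange 0 n 1).filter
              (fun k => !(PySem.List.pyGetD xs k 0 == PySem.List.pyGetD ys k 0)) ++ [n]
  let gaps := (breaks.zip breaks.tail).map (fun p => p.2 - p.1 - 1)
  -- breaks has at least two elements, so gaps is nonempty and Python's max never raises;
  -- the .getD default is unreachable
  gaps.max?.getD 0

-- ===== PRECONDITION & SPEC =====
-- Pre_ excludes negative i or j, where A returns via negative-index wraparound (an accident
-- of Python indexing, e.g. check([1,2,3],[1,2,3],-1,-1) = 4) or raises IndexError (i < -len),
-- while B slices the tail; the natural domain of this helper is non-negative start indices.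
def Pre_check (nums1 : List Int) (nums2 : List Int) (i : Int) (j : Int) : Prop := 0 ≤ i ∧ 0 ≤ j
instance (nums1 : List Int) (nums2 : List Int) (i : Int) (j : Int) : Decidable (Pre_check nums1 nums2 i j) := by unfold Pre_check; infer_instance

def pvWitness_check : List Int × List Int × Int × Int := ([1, 2, 3, 2, 1], [3, 2, 1, 4, 7], 0, 0)

def Spec_check (nums1 : List Int) (nums2 : List Int) (i : Int) (j : Int) (out : Int) : Prop := out = check_alt nums1 nums2 i j
instance (nums1 : List Int) (nums2 : List Int) (i : Int) (j : Int) (out : Int) : Decidable (Spec_check nums1 nums2 i j out) := by unfold Spec_check; infer_instance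

-- ===== CLAIM (what is proved, stated in full; the proofs are below) =====
def Claim_equal_check : Prop := ∀ (nums1 : List Int) (nums2 : List Int) (i : Int) (j : Int), Dom_check nums1 nums2 i j → Pre_check nums1 nums2 i j → Spec_check nums1 nums2 i j (check nums1 nums2 i j)

-- ===== LEMMAS AND PROOFS =====

-- A's loop over the boolean diagonal (abstract form)
def boolLoop : List Bool → Int → Int → Int
  | [], m, _ => m
  | b :: bs, m, c => if b then boolLoop bs (max m (c + 1)) (c + 1) else boolLoop bs m 0

def eqDiag (xs ys : List Int) : List Bool := (xs.zip ys).map (fun p => p.1 == p.2)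

-- mismatch positions of a boolean list, recursively
def falseIdx : List Bool → List Int
  | [] => []
  | b :: bs => (if b then [] else [(0 : Int)]) ++ (falseIdx bs).map (· + 1)

-- gaps between consecutive breaks, given the previous break
def gapsFrom : Int → List Int → List Int
  | _, [] => []
  | p, x :: rest => (x - p - 1) :: gapsFrom x rest

-- the run-gap list of a boolean diagonal, recursively
def G : List Bool → List Int
  | [] => [0]
  | true :: bs => ((G bs).headI + 1) :: (G bs).tail
  | false :: bs => 0 :: G bs

lemma zip_tail_gaps : ∀ (p : Int) (l : List Int),
    ((p :: l).zip l).map (fun q => q.2 - q.1 - 1) = gapsFrom p l := by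
  intro p l
  induction l generalizing p with
  | nil => simp [gapsFrom]
  | cons x r ih => simpa [gapsFrom] using ih x

lemma headI_cons_tail (l : List Int) (h : l ≠ []) : l.headI :: l.tail = l := by
  cases l with
  | nil => simp at h
  | cons a t => simp

lemma G_ne_nil (bs : List Bool) : G bs ≠ [] := by
  cases bs with
  | nil => simp [G]
  | cons b r => cases b <;> simp [G]

lemma headI_mem_G (bs : List Bool) : (G bs).headI ∈ G bs := by
  have h := G_ne_nil bs
  cases hG : G bs with
  | nil => exact absurd hG h
  | cons a t => simp

lemma mem_of_mem_tail_G (bs : List Bool) (x : Int) (h : x ∈ (G bs).tail) : x ∈ G bs := by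
  cases hG : G bs with
  | nil => exact absurd hG (G_ne_nil bs)
  | cons a t => rw [hG] at h; simp at h; simp [h]

lemma G_nonneg : ∀ (bs : List Bool), ∀ x ∈ G bs, 0 ≤ x := by
  intro bs
  induction bs with
  | nil => intro x hx; simp [G] at hx; omega
  | cons b r ih =>
      cases b
      · intro x hx
        simp only [G, List.mem_cons] at hx
        rcases hx with h | h
        · omega
        · exact ih x h
      · intro x hx
        simp only [G, List.mem_cons] at hx
        rcases hx with h | h
        · have := ih _ (headI_mem_G r)
          omega
        · exact ih x (mem_of_mem_tail_G r x h)

lemma gapsFrom_shift : ∀ (l : List Int) (p : Int),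
    gapsFrom (p + 1) (l.map (· + 1)) = gapsFrom p l := by
  intro l
  induction l with
  | nil => intro p; simp [gapsFrom]
  | cons x r ih =>
      intro p
      simp only [List.map_cons, gapsFrom, List.cons.injEq]
      exact ⟨by ring, ih x⟩

lemma gaps_eq_G : ∀ (bs : List Bool),
    gapsFrom (-1) (falseIdx bs ++ [(bs.length : Int)]) = G bs := by
  intro bs
  induction bs with
  | nil => norm_num [falseIdx, gapsFrom, G]
  | cons b r ih =>
      rcases hxr : falseIdx r ++ [((r.length : Int))] with _ | ⟨x, r'⟩
      · exact absurd hxr (by simp)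
      · have hlen : (((b :: r).length : Int)) = (r.length : Int) + 1 := by
          push_cast [List.length_cons]; ring
        cases b
        · -- false
          have key : falseIdx (false :: r) ++ [(((false :: r).length : Int))]
              = 0 :: (falseIdx r ++ [((r.length : Int))]).map (· + 1) := by
            simp [falseIdx]
          rw [key, show G (false :: r) = 0 :: G r from rfl]
          simp only [gapsFrom, List.cons.injEq]
          constructor
          · ring
          · rw [show gapsFrom (0 : Int) = gapsFrom (-1 + 1 : Int) from by norm_num,
              gapsFrom_shift, ih]
        · -- true
          have key : falseIdx (true :: r) ++ [(((true :: r).length : Int))]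
              = (falseIdx r ++ [((r.length : Int))]).map (· + 1) := by
            simp [falseIdx]
          rw [key, hxr, show G (true :: r) = ((G r).headI + 1) :: (G r).tail from rfl]
          simp only [List.map_cons, gapsFrom]
          have hGr : G r = x :: gapsFrom x r' := by
            rw [← ih, hxr]
            simp only [gapsFrom]
            norm_num
          rw [gapsFrom_shift r' x, hGr]
          simp only [List.headI_cons, List.tail_cons, List.cons.injEq]
          exact ⟨by ring, trivial⟩

lemma boolLoop_eq : ∀ (bs : List Bool) (m c : Int), 0 ≤ c → c ≤ m →
    boolLoop bs m c = List.foldl max m ((c + (G bs).headI) :: (G bs).tail) := by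
  intro bs
  induction bs with
  | nil =>
      intro m c hc hcm
      simp only [boolLoop, G, List.headI, List.tail, List.foldl]
      omega
  | cons b r ih =>
      intro m c hc hcm
      have hhead : 0 ≤ (G r).headI := G_nonneg r _ (headI_mem_G r)
      have hGr := headI_cons_tail (G r) (G_ne_nil r)
      cases b
      · -- false
        calc boolLoop (false :: r) m c = boolLoop r m 0 := by simp [boolLoop]
          _ = List.foldl max m ((0 + (G r).headI) :: (G r).tail) :=
              ih m 0 le_rfl (le_trans hc hcm)
          _ = List.foldl max (max (max m c) (G r).headI) (G r).tail := by
              rw [List.foldl_cons]; congr 1; omega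
          _ = List.foldl max (max m c) (G r) := by
              rw [← hGr, List.foldl_cons]
              simp only [List.headI_cons, List.tail_cons]
          _ = List.foldl max m ((c + (G (false :: r)).headI) :: (G (false :: r)).tail) := by
              rw [show G (false :: r) = 0 :: G r from rfl]
              simp only [List.headI_cons, List.tail_cons]
              rw [List.foldl_cons, ← hGr, List.foldl_cons, List.foldl_cons]
              congr 1
              omega
      · -- true
        calc boolLoop (true :: r) m c = boolLoop r (max m (c + 1)) (c + 1) := by simp [boolLoop]
          _ = List.foldl max (max m (c + 1)) ((c + 1 + (G r).headI) :: (G r).tail) :=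
              ih (max m (c + 1)) (c + 1) (by omega) (le_max_right _ _)
          _ = List.foldl max m ((c + (G (true :: r)).headI) :: (G (true :: r)).tail) := by
              rw [show G (true :: r) = ((G r).headI + 1) :: (G r).tail from rfl]
              simp only [List.headI_cons, List.tail_cons]
              rw [List.foldl_cons, List.foldl_cons]
              congr 1
              omega

-- A-side: the loop equals boolLoop on the equality diagonal
lemma checkLoop_eq (nums1 nums2 : List Int) (i j m c : Int) (hi : 0 ≤ i) (hj : 0 ≤ j) :
    checkLoop nums1 nums2 i j m c
      = boolLoop (eqDiag (nums1.drop i.toNat) (nums2.drop j.toNat)) m c := by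
  fun_induction checkLoop nums1 nums2 i j m c with
  | case1 i j maxL curL hcond a b hb ha heq ih =>
      have h1 : i.toNat < nums1.length := by
        simp only [PySem.List.len_eq] at hcond; omega
      have h2 : j.toNat < nums2.length := by
        simp only [PySem.List.len_eq] at hcond; omega
      have ha' : nums1[i.toNat] = a := by
        rw [PySem.List.pyGet?_eq_some_getElem nums1 hi
          (by simpa only [PySem.List.len_eq] using hcond.1)] at ha
        exact Option.some.inj ha
      have hb' : nums2[j.toNat] = b := by
        rw [PySem.List.pyGet?_eq_some_getElem nums2 hj
          (by simpa only [PySem.List.len_eq] using hcond.2)] at hb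
        exact Option.some.inj hb
      have hti : (i + 1).toNat = i.toNat + 1 := by omega
      have htj : (j + 1).toNat = j.toNat + 1 := by omega
      rw [ih (by omega) (by omega), hti, htj,
        List.drop_eq_getElem_cons h1, List.drop_eq_getElem_cons h2]
      simp only [eqDiag, List.zip_cons_cons, List.map_cons, boolLoop, ha', hb', heq, if_true]
  | case2 i j maxL curL hcond a b hb ha heq ih =>
      have h1 : i.toNat < nums1.length := by
        simp only [PySem.List.len_eq] at hcond; omega
      have h2 : j.toNat < nums2.length := by
        simp only [PySem.List.len_eq] at hcond; omega
      have ha' : nums1[i.toNat] = a := by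
        rw [PySem.List.pyGet?_eq_some_getElem nums1 hi
          (by simpa only [PySem.List.len_eq] using hcond.1)] at ha
        exact Option.some.inj ha
      have hb' : nums2[j.toNat] = b := by
        rw [PySem.List.pyGet?_eq_some_getElem nums2 hj
          (by simpa only [PySem.List.len_eq] using hcond.2)] at hb
        exact Option.some.inj hb
      have hti : (i + 1).toNat = i.toNat + 1 := by omega
      have htj : (j + 1).toNat = j.toNat + 1 := by omega
      rw [ih (by omega) (by omega), hti, htj,
        List.drop_eq_getElem_cons h1, List.drop_eq_getElem_cons h2]
      simp only [eqDiag, List.zip_cons_cons, List.map_cons, boolLoop, ha', hb']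
      rw [if_neg heq]
  | case3 i j maxL curL hcond hnone =>
      exact (hnone _ _
        (PySem.List.pyGet?_eq_some_getElem nums1 hi
          (by simpa only [PySem.List.len_eq] using hcond.1))
        (PySem.List.pyGet?_eq_some_getElem nums2 hj
          (by simpa only [PySem.List.len_eq] using hcond.2))).elim
  | case4 i j maxL curL hcond =>
      simp only [PySem.List.len_eq, not_and, not_lt] at hcond
      by_cases h : (nums1.length : Int) ≤ i
      · rw [List.drop_eq_nil_of_le (by omega : nums1.length ≤ i.toNat)]
        simp [eqDiag, boolLoop]
      · have := hcond (by omega)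
        rw [List.drop_eq_nil_of_le (by omega : nums2.length ≤ j.toNat)]
        simp [eqDiag, boolLoop]

lemma falseIdx_eq : ∀ (bs : List Bool),
    falseIdx bs
      = ((List.range bs.length).filter (fun k => !bs.getD k true)).map (fun k : Nat => (k : Int)) := by
  intro bs
  induction bs with
  | nil => simp [falseIdx]
  | cons b r ih =>
      rw [falseIdx, List.length_cons, List.range_succ_eq_map, List.filter_cons, List.filter_map]
      have hpred : ((fun k => !(b :: r).getD k true) ∘ Nat.succ) = (fun k => !r.getD k true) := by
        funext k
        simp
      have hmm : ∀ (L : List Nat),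
          (L.map Nat.succ).map (fun k : Nat => (k : Int)) = (L.map (fun k : Nat => (k : Int))).map (· + 1) := by
        intro L
        simp only [List.map_map]
        congr 1
      rw [hpred]
      cases b
      · simp only [List.getD_cons_zero, Bool.not_false, if_true, List.map_cons, hmm, ← ih,
          Nat.cast_zero]
        simp
      · simp only [List.getD_cons_zero, Bool.not_true, Bool.false_eq_true, if_false, hmm, ← ih]
        simp

lemma check_alt_eq (nums1 nums2 : List Int) (i j : Int) (hi : 0 ≤ i) (hj : 0 ≤ j) :
    check_alt nums1 nums2 i j
      = (G (eqDiag (nums1.drop i.toNat) (nums2.drop j.toNat))).max?.getD 0 := by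
  unfold check_alt
  rw [PySem.List.slice_from nums1 hi, PySem.List.slice_from nums2 hj]
  dsimp only
  set xs := nums1.drop i.toNat with hxs
  set ys := nums2.drop j.toNat with hys
  set bs := eqDiag xs ys with hbs
  have hblen : bs.length = min xs.length ys.length := by
    simp [hbs, eqDiag, List.length_zip]
  have hlen : min (PySem.List.len xs) (PySem.List.len ys) = (bs.length : Int) := by
    simp only [PySem.List.len_eq, hblen]
    push_cast
    rfl
  rw [hlen, PySem.List.pyRange_zero_natCast, List.filter_map]
  have hfil : (List.range bs.length).filter
        ((fun k => !(PySem.List.pyGetD xs k 0 == PySem.List.pyGetD ys k 0)) ∘ (fun k : Nat => (k : Int)))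
      = (List.range bs.length).filter (fun k => !bs.getD k true) := by
    apply List.filter_congr
    intro k hk
    have hk' : k < bs.length := List.mem_range.mp hk
    have hkx : k < xs.length := by omega
    have hky : k < ys.length := by omega
    simp only [Function.comp_def, PySem.List.pyGetD_natCast]
    rw [List.getD_eq_getElem _ _ hkx, List.getD_eq_getElem _ _ hky,
      List.getD_eq_getElem _ _ hk']
    simp [hbs, eqDiag]
  rw [hfil, ← falseIdx_eq bs]
  have hbreaks : (([-1] : List Int) ++ falseIdx bs ++ [(bs.length : Int)])
      = -1 :: (falseIdx bs ++ [(bs.length : Int)]) := by simp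
  rw [hbreaks, List.tail_cons, zip_tail_gaps, gaps_eq_G]

theorem check_spec : Claim_equal_check := by
  intro nums1 nums2 i j _ hpre
  obtain ⟨hi, hj⟩ := hpre
  unfold Spec_check
  rw [show check nums1 nums2 i j = checkLoop nums1 nums2 i j 0 0 from rfl,
    checkLoop_eq nums1 nums2 i j 0 0 hi hj, check_alt_eq nums1 nums2 i j hi hj]
  set bs := eqDiag (nums1.drop i.toNat) (nums2.drop j.toNat) with hbs
  have hh : 0 ≤ (G bs).headI := G_nonneg bs _ (headI_mem_G bs)
  obtain ⟨h, t, hG⟩ : ∃ h t, G bs = h :: t := ⟨_, _, (headI_cons_tail (G bs) (G_ne_nil bs)).symm⟩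
  rw [boolLoop_eq bs 0 0 le_rfl le_rfl, hG]
  rw [hG] at hh
  simp only [List.headI_cons, List.tail_cons] at hh ⊢
  rw [List.max?_cons', Option.getD_some, List.foldl_cons]
  congr 1
  omega
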